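-- pv_equiv track=rewrite | github.com/SaarShai/Primes-Equispaced | experiments/hour2_erdos_turan.py | mertens
-- ===== SOURCE A (Python) =====
-- def mertens(limit):
--     """Compute M(n) = Σ_{k≤n} μ(k) for all n ≤ limit."""
--     mu = [0] * (limit + 1)
--     mu[1] = 1
--     is_prime = [True] * (limit + 1)
--     primes = []
--     for i in range(2, limit + 1):
--         if is_prime[i]:
--             primes.append(i)
--             mu[i] = -1
--         for p in primes:
--             if i * p > limit:
--                 break
--             is_prime[i * p] = False
--             if i % p == 0:
--                 mu[i * p] = 0
--                 break
--             else:
--                 mu[i * p] = -mu[i]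
--     M = [0] * (limit + 1)
--     for i in range(1, limit + 1):
--         M[i] = M[i-1] + mu[i]
--     return M, mu
-- ===== SOURCE B (Python) =====
-- def mertens(limit):
--     """Compute M(n) = Sum_{k<=n} mu(k) for all n <= limit."""
--     mu = [0] * (limit + 1)
--     mu[1] = 1
--     for n in range(2, limit + 1):
--         # smallest prime factor of n by trial division
--         p = n
--         d = 2
--         while d * d <= n:
--             if n % d == 0:
--                 p = d
--                 break
--             d += 1
--         if p == n:
--             mu[n] = -1
--         else:
--             q = n // p
--             mu[n] = 0 if q % p == 0 else -mu[q]
--     M = [0] * (limit + 1)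
--     for i in range(1, limit + 1):
--         M[i] = M[i-1] + mu[i]
--     return M, mu
-- ===== Notes on version B (the rewrite author's own statement) =====
-- stated objective: simpler
-- what changed: Replaces the linear (Euler) sieve with its primes list, is_prime array and inner break-loop by a direct per-n trial-division computation of the smallest prime factor p, applying the recurrence mu[n] = -1 if n prime, 0 if p divides n/p, else -mu[n/p].
import Mathlib
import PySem

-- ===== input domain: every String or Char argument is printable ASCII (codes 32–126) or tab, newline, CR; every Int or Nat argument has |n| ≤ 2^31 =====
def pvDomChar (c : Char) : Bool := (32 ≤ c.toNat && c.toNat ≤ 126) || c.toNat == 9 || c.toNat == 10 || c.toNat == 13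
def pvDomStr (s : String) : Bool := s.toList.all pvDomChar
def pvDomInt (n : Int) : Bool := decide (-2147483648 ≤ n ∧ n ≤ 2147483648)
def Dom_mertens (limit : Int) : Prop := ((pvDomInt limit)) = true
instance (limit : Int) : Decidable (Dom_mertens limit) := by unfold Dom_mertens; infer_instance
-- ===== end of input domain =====

-- B replaces A's linear (Euler) sieve by a per-n trial-division smallest-prime-factor
-- recurrence: a genuinely different algorithm with the same exact output (objective: simpler).

-- list read with Python-list defaults; every index read below is in range, so getD is exact
def lget (l : List Int) (i : Nat) : Int := l.getD i 0
def bget (l : List Bool) (i : Nat) : Bool := l.getD i true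

-- ===== PORT A =====
-- the `for p in primes` inner loop with its two breaks
def innerA (N i : Nat) : List Nat → List Int × List Bool → List Int × List Bool
  | [], st => st
  | p :: ps, (mu, isP) =>
    if N < i * p then (mu, isP)
    else
      let isP' := isP.set (i * p) false
      if i % p = 0 then (mu.set (i * p) 0, isP')
      else innerA N i ps (mu.set (i * p) (-(lget mu i)), isP')

-- body of `for i in range(2, limit + 1)`
def stepA (N : Nat) (st : List Int × List Bool × List Nat) (i : Nat) :
    List Int × List Bool × List Nat :=
  let primes' := if bget st.2.1 i then st.2.2 ++ [i] else st.2.2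
  let mu' := if bget st.2.1 i then st.1.set i (-1) else st.1
  let r := innerA N i primes' (mu', st.2.1)
  (r.1, r.2, primes')

def mertens (limit : Int) : List Int × List Int :=
  let N := limit.toNat
  let st := (List.range' 2 (N - 1)).foldl (stepA N)
      ((List.replicate (N + 1) (0 : Int)).set 1 1, List.replicate (N + 1) true, ([] : List Nat))
  let mu := st.1
  let M := (List.range' 1 N).foldl (fun M i => M.set i (lget M (i - 1) + lget mu i))
      (List.replicate (N + 1) (0 : Int))
  (M, mu)

-- ===== PORT B =====
-- `while d * d <= n:` trial-division scan for the smallest prime factor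
def spfLoop (n d : Nat) : Nat :=
  if h : n < d * d then n
  else if n % d = 0 then d
  else spfLoop n (d + 1)
termination_by n + 1 - d
decreasing_by
  cases d with
  | zero => omega
  | succ k =>
    have h1 : (k + 1) ≤ (k + 1) * (k + 1) := Nat.le_mul_of_pos_left _ (Nat.succ_pos k)
    omega

-- body of `for n in range(2, limit + 1)`
def stepB (mu : List Int) (n : Nat) : List Int :=
  let p := spfLoop n 2
  if p = n then mu.set n (-1)
  else mu.set n (if (n / p) % p = 0 then 0 else -(lget mu (n / p)))

def mertens_alt (limit : Int) : List Int × List Int :=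
  let N := limit.toNat
  let mu := (List.range' 2 (N - 1)).foldl stepB ((List.replicate (N + 1) (0 : Int)).set 1 1)
  let M := (List.range' 1 N).foldl (fun M i => M.set i (lget M (i - 1) + lget mu i))
      (List.replicate (N + 1) (0 : Int))
  (M, mu)

-- ===== PRECONDITION & SPEC =====
-- Python A raises IndexError (at `mu[1] = 1`) for limit <= 0; B raises there in the same way.
def Pre_mertens (limit : Int) : Prop := 1 ≤ limit
instance (limit : Int) : Decidable (Pre_mertens limit) := by unfold Pre_mertens; infer_instance
def pvWitness_mertens : Int := 10

def Spec_mertens (limit : Int) (out : List Int × List Int) : Prop := out = mertens_alt limit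
instance (limit : Int) (out : List Int × List Int) : Decidable (Spec_mertens limit out) := by
  unfold Spec_mertens; infer_instance

-- ===== CLAIM (what is proved, stated in full; the proofs are below) =====
def Claim_equal_mertens : Prop :=
  ∀ (limit : Int), Dom_mertens limit → Pre_mertens limit → Spec_mertens limit (mertens limit)

-- ===== LEMMAS AND PROOFS =====

lemma lget_set (l : List Int) (i j : Nat) (v : Int) :
    lget (l.set i v) j = if i = j ∧ j < l.length then v else lget l j := by
  simp only [lget, List.getD_eq_getElem?_getD, List.getElem?_set]
  split
  · rename_i h; subst h
    by_cases hj : i < l.length <;> simp [hj]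
  · rename_i h
    simp only [if_neg (fun h2 : i = j ∧ _ => h h2.1)]

def muRec : Nat → Int
  | 0 => 0
  | 1 => 1
  | (n + 2) =>
    let m := n + 2
    if m.minFac = m then -1
    else if (m / m.minFac) % m.minFac = 0 then 0 else -muRec (m / m.minFac)
decreasing_by
  exact Nat.div_lt_self (by omega) (Nat.minFac_prime (by omega)).one_lt

lemma muRec_two {m : Nat} (h : 2 ≤ m) :
    muRec m = if m.minFac = m then -1
      else if (m / m.minFac) % m.minFac = 0 then 0 else -muRec (m / m.minFac) := by
  obtain ⟨n, rfl⟩ : ∃ n, m = n + 2 := ⟨m - 2, by omega⟩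
  rw [muRec]

lemma minFac_two_le {m : Nat} (h : 2 ≤ m) : 2 ≤ m.minFac :=
  (Nat.minFac_prime (by omega)).two_le

lemma cross_lt {m : Nat} (h : 2 ≤ m) : m / m.minFac < m :=
  Nat.div_lt_self (by omega) (Nat.minFac_prime (by omega)).one_lt

lemma cross_two_le {m : Nat} (h : 2 ≤ m) (hc : m.minFac ≠ m) : 2 ≤ m / m.minFac := by
  have hnp : ¬ m.Prime := fun hp => hc hp.minFac_eq
  exact le_trans (minFac_two_le h) (Nat.minFac_le_div (by omega) hnp)


lemma spfLoop_eq_minFac : ∀ n d, 2 ≤ n → 2 ≤ d → d ≤ n.minFac → spfLoop n d = n.minFac := by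
  intro n d
  induction d using spfLoop.induct n with
  | case1 d h =>
    intro hn hd hle
    rw [spfLoop, dif_pos h]
    by_contra hne
    have hnp : ¬ n.Prime := fun hp => hne hp.minFac_eq.symm
    have h1 := Nat.minFac_sq_le_self (by omega : 0 < n) hnp
    have h2 : d * d ≤ n.minFac * n.minFac := Nat.mul_le_mul hle hle
    nlinarith
  | case2 d h hmod =>
    intro hn hd hle
    rw [spfLoop, dif_neg h, if_pos hmod]
    exact le_antisymm hle (Nat.minFac_le_of_dvd hd (Nat.dvd_of_mod_eq_zero hmod))
  | case3 d h hmod ih =>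
    intro hn hd hle
    rw [spfLoop, dif_neg h, if_neg hmod]
    apply ih hn (by omega)
    have hne : d ≠ n.minFac := fun he => hmod (by
      rw [he]; exact Nat.mod_eq_zero_of_dvd (Nat.minFac_dvd n))
    omega


lemma B_inv (N : Nat) (hN : 1 ≤ N) : ∀ j, 1 ≤ j → j ≤ N →
    ((List.range' 2 (j - 1)).foldl stepB ((List.replicate (N + 1) (0 : Int)).set 1 1)).length = N + 1 ∧
    ∀ m, m ≤ N →
      lget ((List.range' 2 (j - 1)).foldl stepB ((List.replicate (N + 1) (0 : Int)).set 1 1)) m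
        = if m ≤ j then muRec m else 0 := by
  intro j
  induction j with
  | zero => omega
  | succ j ih =>
    intro _ hjN
    by_cases hj1 : j = 0
    · subst hj1
      simp only [Nat.add_sub_cancel, List.range'_zero, List.foldl_nil]
      constructor
      · rw [List.length_set, List.length_replicate]
      · intro m hm
        rw [lget_set]
        simp only [List.length_replicate]
        rcases m with _ | _ | m
        · simp [lget, muRec]
        · simp [muRec]; omega
        · have : ¬ (1 = m + 2 ∧ m + 2 < N + 1) := by omega
          rw [if_neg this]
          simp only [lget]
          rw [List.getD_eq_getElem?_getD]
          by_cases hmN : m + 2 < N + 1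
          · simp [hmN]
          · rw [List.getElem?_eq_none (by simp only [List.length_replicate]; omega)]; simp
    · have h1j : 1 ≤ j := by omega
      obtain ⟨hlen, hval⟩ := ih h1j (by omega)
      have hrange : List.range' 2 (j + 1 - 1) = List.range' 2 (j - 1) ++ [j + 1] := by
        have : j + 1 - 1 = (j - 1) + 1 := by omega
        rw [this, List.range'_concat]
        congr 2
        omega
      rw [hrange, List.foldl_append, List.foldl_cons, List.foldl_nil]
      set l := (List.range' 2 (j - 1)).foldl stepB ((List.replicate (N + 1) (0 : Int)).set 1 1) with hl
      have hj2 : 2 ≤ j + 1 := by omega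
      have hspf : spfLoop (j + 1) 2 = (j + 1).minFac :=
        spfLoop_eq_minFac (j + 1) 2 hj2 le_rfl (minFac_two_le hj2)
      unfold stepB
      rw [hspf]
      constructor
      · by_cases hp : (j + 1).minFac = j + 1 <;> simp [hp, hlen]
      · intro m hm
        by_cases hp : (j + 1).minFac = j + 1
        · rw [if_pos hp, lget_set, hlen]
          by_cases hmj : m = j + 1
          · subst hmj
            rw [if_pos ⟨rfl, by omega⟩, if_pos (le_refl _), muRec_two hj2, if_pos hp]
          · rw [if_neg (by omega), hval m hm]
            have : (m ≤ j + 1 ↔ m ≤ j) := by omega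
            rw [if_congr this rfl rfl]
        · rw [if_neg hp, lget_set, hlen]
          by_cases hmj : m = j + 1
          · subst hmj
            rw [if_pos ⟨rfl, by omega⟩, if_pos (le_refl _), muRec_two hj2, if_neg hp]
            have hq2 : (j + 1) / (j + 1).minFac < j + 1 := cross_lt hj2
            have : lget l ((j + 1) / (j + 1).minFac) = muRec ((j + 1) / (j + 1).minFac) := by
              rw [hval _ (by omega), if_pos (by omega)]
            rw [this]
          · rw [if_neg (by omega), hval m hm]
            have : (m ≤ j + 1 ↔ m ≤ j) := by omega
            rw [if_congr this rfl rfl]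


lemma bget_set (l : List Bool) (i j : Nat) (v : Bool) :
    bget (l.set i v) j = if i = j ∧ j < l.length then v else bget l j := by
  simp only [bget, List.getD_eq_getElem?_getD, List.getElem?_set]
  split
  · rename_i h; subst h
    by_cases hj : i < l.length <;> simp [hj]
  · rename_i h
    simp only [if_neg (fun h2 : i = j ∧ _ => h h2.1)]


def procd (N i : Nat) (ps : List Nat) (p : Nat) : Prop :=
  p ∈ ps ∧ i * p ≤ N ∧ ∀ q ∈ ps, q < p → ¬ q ∣ i

lemma innerA_spec (N i : Nat) (hi : 2 ≤ i) :
    ∀ (ps : List Nat) (mu : List Int) (isP : List Bool),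
    List.Pairwise (· < ·) ps → (∀ p ∈ ps, 2 ≤ p) →
    mu.length = N + 1 → isP.length = N + 1 →
    (innerA N i ps (mu, isP)).1.length = N + 1 ∧
    (innerA N i ps (mu, isP)).2.length = N + 1 ∧
    (∀ m, (∀ p, procd N i ps p → m ≠ i * p) →
      lget (innerA N i ps (mu, isP)).1 m = lget mu m ∧
      bget (innerA N i ps (mu, isP)).2 m = bget isP m) ∧
    (∀ p, procd N i ps p →
      lget (innerA N i ps (mu, isP)).1 (i * p) = (if i % p = 0 then 0 else -(lget mu i)) ∧
      bget (innerA N i ps (mu, isP)).2 (i * p) = false) := by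
  intro ps
  induction ps with
  | nil =>
    intro mu isP _ _ hmu hisP
    exact ⟨hmu, hisP, fun m _ => ⟨rfl, rfl⟩, fun p hp => absurd hp.1 (List.not_mem_nil)⟩
  | cons p₀ ps ih =>
    intro mu isP hpair htwo hmu hisP
    have hp₀2 : 2 ≤ p₀ := htwo p₀ (by simp)
    have hlt : ∀ q ∈ ps, p₀ < q := fun q hq => (List.pairwise_cons.mp hpair).1 q hq
    by_cases hbig : N < i * p₀
    · have hres : innerA N i (p₀ :: ps) (mu, isP) = (mu, isP) := by
        rw [innerA, if_pos hbig]
      rw [hres]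
      have hnop : ∀ p, ¬ procd N i (p₀ :: ps) p := by
        intro p hp
        rcases hp with ⟨hmem, hle, _⟩
        rcases List.mem_cons.mp hmem with rfl | hmem'
        · omega
        · have h1 := hlt p hmem'
          have h2 : i * p₀ ≤ i * p := Nat.mul_le_mul_left i (by omega)
          omega
      exact ⟨hmu, hisP, fun m _ => ⟨rfl, rfl⟩, fun p hp => absurd hp (hnop p)⟩
    · by_cases hdvd : i % p₀ = 0
      · have hres : innerA N i (p₀ :: ps) (mu, isP)
            = (mu.set (i * p₀) 0, isP.set (i * p₀) false) := by
          rw [innerA, if_neg hbig, if_pos hdvd]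
        rw [hres]
        have hponly : ∀ p, procd N i (p₀ :: ps) p → p = p₀ := by
          intro p hp
          rcases hp with ⟨hmem, _, hq⟩
          rcases List.mem_cons.mp hmem with rfl | hmem'
          · rfl
          · exact absurd (Nat.dvd_of_mod_eq_zero hdvd)
              (hq p₀ (by simp) (hlt p hmem'))
        have hprocd₀ : procd N i (p₀ :: ps) p₀ := by
          refine ⟨by simp, by omega, ?_⟩
          intro q hq hqlt
          rcases List.mem_cons.mp hq with rfl | hq'
          · omega
          · have := hlt q hq'; omega
        refine ⟨by rw [List.length_set, hmu], by rw [List.length_set, hisP], ?_, ?_⟩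
        · intro m hm
          have hne : m ≠ i * p₀ := hm p₀ hprocd₀
          constructor
          · rw [lget_set, if_neg (by intro h; exact hne h.1.symm)]
          · rw [bget_set, if_neg (by intro h; exact hne h.1.symm)]
        · intro p hp
          have hpp := hponly p hp
          subst hpp
          rw [if_pos hdvd]
          constructor
          · rw [lget_set, if_pos ⟨rfl, by omega⟩]
          · rw [bget_set, if_pos ⟨rfl, by omega⟩]
      · have hres : innerA N i (p₀ :: ps) (mu, isP)
            = innerA N i ps (mu.set (i * p₀) (-(lget mu i)), isP.set (i * p₀) false) := by
          rw [innerA, if_neg hbig, if_neg hdvd]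
        rw [hres]
        have hnd : ¬ p₀ ∣ i := fun h => hdvd (Nat.mod_eq_zero_of_dvd h)
        have hcons : ∀ p, procd N i (p₀ :: ps) p ↔ p = p₀ ∨ procd N i ps p := by
          intro p
          constructor
          · rintro ⟨hmem, hle, hq⟩
            rcases List.mem_cons.mp hmem with rfl | hmem'
            · exact Or.inl rfl
            · exact Or.inr ⟨hmem', hle, fun q hq' hql => hq q (List.mem_cons_of_mem _ hq') hql⟩
          · rintro (rfl | ⟨hmem, hle, hq⟩)
            · refine ⟨by simp, by omega, ?_⟩
              intro q hq hqlt
              rcases List.mem_cons.mp hq with rfl | hq'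
              · omega
              · have := hlt q hq'; omega
            · refine ⟨List.mem_cons_of_mem _ hmem, hle, ?_⟩
              intro q hq' hql
              rcases List.mem_cons.mp hq' with rfl | hq''
              · exact fun hd => hnd hd
              · exact hq q hq'' hql
        obtain ⟨ihl1, ihl2, ihu, ihw⟩ := ih (mu.set (i * p₀) (-(lget mu i)))
          (isP.set (i * p₀) false) (List.pairwise_cons.mp hpair).2
          (fun p hp => htwo p (List.mem_cons_of_mem _ hp))
          (by rw [List.length_set, hmu]) (by rw [List.length_set, hisP])
        refine ⟨ihl1, ihl2, ?_, ?_⟩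
        · intro m hm
          have hm' : ∀ p, procd N i ps p → m ≠ i * p := fun p hp =>
            hm p ((hcons p).mpr (Or.inr hp))
          obtain ⟨hu1, hu2⟩ := ihu m hm'
          have hne : m ≠ i * p₀ := hm p₀ ((hcons p₀).mpr (Or.inl rfl))
          constructor
          · rw [hu1, lget_set, if_neg (by intro h; exact hne h.1.symm)]
          · rw [hu2, bget_set, if_neg (by intro h; exact hne h.1.symm)]
        · intro p hp
          rcases (hcons p).mp hp with rfl | hp'
          · have huntouched : ∀ p', procd N i ps p' → i * p ≠ i * p' := by
              intro p' hpp' heq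
              have h1 := hlt p' hpp'.1
              have h2 : i * p < i * p' := by nlinarith
              omega
            obtain ⟨hu1, hu2⟩ := ihu (i * p) huntouched
            constructor
            · rw [hu1, lget_set, if_pos ⟨rfl, by omega⟩, if_neg hdvd]
            · rw [hu2, bget_set, if_pos ⟨rfl, by omega⟩]

          · obtain ⟨hw1, hw2⟩ := ihw p hp'
            have hii : i * p₀ ≠ i := by nlinarith
            have hcond : ¬ (i * p₀ = i ∧ i < mu.length) := fun h => hii h.1
            constructor
            · rw [hw1, lget_set, if_neg hcond]
            · rw [hw2]


def primesUpTo (k : Nat) : List Nat := (List.range' 2 (k - 1)).filter (fun p => decide p.Prime)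

def wrA (k m : Nat) : Bool :=
  decide (2 ≤ m ∧ ((m.minFac = m ∧ m ≤ k) ∨ (m.minFac ≠ m ∧ m / m.minFac ≤ k)))

lemma mem_primesUpTo {k p : Nat} : p ∈ primesUpTo k ↔ p.Prime ∧ p ≤ k := by
  simp only [primesUpTo, List.mem_filter, List.mem_range'_1, decide_eq_true_eq]
  constructor
  · rintro ⟨⟨h2, hlt⟩, hp⟩
    exact ⟨hp, by omega⟩
  · rintro ⟨hp, hle⟩
    have h2 := hp.two_le
    exact ⟨⟨h2, by omega⟩, hp⟩

lemma pairwise_primesUpTo (k : Nat) : List.Pairwise (· < ·) (primesUpTo k) := by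
  have h := List.pairwise_lt_range' (s := 2) (n := k - 1) (step := 1)
  exact List.Pairwise.sublist List.filter_sublist h

lemma primesUpTo_succ (k : Nat) (hk : 1 ≤ k) :
    primesUpTo (k + 1) = primesUpTo k ++ (if (k + 1).Prime then [k + 1] else []) := by
  unfold primesUpTo
  have h1 : k + 1 - 1 = (k - 1) + 1 := by omega
  rw [h1, List.range'_concat, List.filter_append]
  have h2 : 2 + 1 * (k - 1) = k + 1 := by omega
  rw [h2]
  by_cases hp : (k + 1).Prime <;> simp [hp]

lemma procd_iff (N i p : Nat) (hi : 2 ≤ i) :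
    procd N i (primesUpTo i) p ↔ p.Prime ∧ p ≤ i.minFac ∧ i * p ≤ N := by
  constructor
  · rintro ⟨hmem, hle, hq⟩
    obtain ⟨hp, hpi⟩ := mem_primesUpTo.mp hmem
    refine ⟨hp, ?_, hle⟩
    by_contra hgt
    have hqp : i.minFac.Prime := Nat.minFac_prime (by omega)
    have hqmem : i.minFac ∈ primesUpTo i :=
      mem_primesUpTo.mpr ⟨hqp, Nat.minFac_le (by omega)⟩
    exact hq i.minFac hqmem (by omega) (Nat.minFac_dvd i)
  · rintro ⟨hp, hle, hN⟩
    have hmf : i.minFac ≤ i := Nat.minFac_le (by omega)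
    refine ⟨mem_primesUpTo.mpr ⟨hp, by omega⟩, hN, ?_⟩
    intro q hqmem hql hqdvd
    obtain ⟨hqp, _⟩ := mem_primesUpTo.mp hqmem
    have := Nat.minFac_le_of_dvd hqp.two_le hqdvd
    omega

lemma mark_of_procd (N i p m : Nat) (hi : 2 ≤ i) (hp : procd N i (primesUpTo i) p)
    (hm : m = i * p) :
    m.minFac = p ∧ m / p = i ∧ 2 ≤ m ∧ m ≤ N ∧ m.minFac ≠ m := by
  obtain ⟨hpp, hple, hN⟩ := (procd_iff N i p hi).mp hp
  have hp2 := hpp.two_le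
  have hpdvd : p ∣ m := hm ▸ dvd_mul_left p i
  have hm2 : 2 ≤ m := by nlinarith
  have hmf : m.minFac = p := by
    have h1 : m.minFac ≤ p := Nat.minFac_le_of_dvd hp2 hpdvd
    have h2 : p ≤ m.minFac := by
      have hmp : m.minFac.Prime := Nat.minFac_prime (by omega)
      have hdvd : m.minFac ∣ i * p := hm ▸ Nat.minFac_dvd m
      rcases (Nat.Prime.dvd_mul hmp).mp hdvd with hdi | hdp
      · have := Nat.minFac_le_of_dvd hmp.two_le hdi
        omega
      · have := (Nat.prime_dvd_prime_iff_eq hmp hpp).mp hdp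
        omega
    omega
  refine ⟨hmf, ?_, hm2, hm ▸ hN, ?_⟩
  · rw [hm, Nat.mul_div_cancel _ (by omega)]
  · rw [hmf]; nlinarith
lemma procd_of_mark (N i m : Nat) (hi : 2 ≤ i) (hm2 : 2 ≤ m) (hmN : m ≤ N)
    (_hcomp : m.minFac ≠ m) (hcross : m / m.minFac = i) :
    procd N i (primesUpTo i) m.minFac ∧ m = i * m.minFac := by
  have hpp : m.minFac.Prime := Nat.minFac_prime (by omega)
  have hmeq : m = i * m.minFac := by
    rw [← hcross, Nat.div_mul_cancel (Nat.minFac_dvd m)]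
  have hidvd : i ∣ m := by
    rw [← hcross]
    exact Nat.div_dvd_of_dvd (Nat.minFac_dvd m)
  have hle : m.minFac ≤ i.minFac := by
    have h1 : i.minFac ∣ m := dvd_trans (Nat.minFac_dvd i) hidvd
    exact Nat.minFac_le_of_dvd (Nat.minFac_prime (by omega)).two_le h1
  exact ⟨(procd_iff N i m.minFac hi).mpr ⟨hpp, hle, by omega⟩, hmeq⟩

lemma bget_replicate (N m : Nat) (hm : m ≤ N) :
    bget (List.replicate (N + 1) true) m = true := by
  simp only [bget, List.getD_eq_getElem?_getD, List.getElem?_replicate]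
  rw [if_pos (by omega)]
  rfl

lemma A_inv (N : Nat) (hN : 1 ≤ N) : ∀ k, 1 ≤ k → k ≤ N →
    ((List.range' 2 (k - 1)).foldl (stepA N)
      ((List.replicate (N + 1) (0 : Int)).set 1 1, List.replicate (N + 1) true, ([] : List Nat))).1.length = N + 1 ∧
    ((List.range' 2 (k - 1)).foldl (stepA N)
      ((List.replicate (N + 1) (0 : Int)).set 1 1, List.replicate (N + 1) true, ([] : List Nat))).2.1.length = N + 1 ∧
    ((List.range' 2 (k - 1)).foldl (stepA N)
      ((List.replicate (N + 1) (0 : Int)).set 1 1, List.replicate (N + 1) true, ([] : List Nat))).2.2 = primesUpTo k ∧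
    (∀ m, m ≤ N →
      (bget ((List.range' 2 (k - 1)).foldl (stepA N)
        ((List.replicate (N + 1) (0 : Int)).set 1 1, List.replicate (N + 1) true, ([] : List Nat))).2.1 m = false
        ↔ (2 ≤ m ∧ m.minFac ≠ m ∧ m / m.minFac ≤ k))) ∧
    (∀ m, m ≤ N →
      lget ((List.range' 2 (k - 1)).foldl (stepA N)
        ((List.replicate (N + 1) (0 : Int)).set 1 1, List.replicate (N + 1) true, ([] : List Nat))).1 m
        = if m = 1 then 1 else if wrA k m then muRec m else 0) := by
  intro k
  induction k with
  | zero => omega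
  | succ k ih =>
    intro _ hkN
    by_cases hk1 : k = 0
    · -- base case k+1 = 1: nothing processed yet
      subst hk1
      simp only [Nat.add_sub_cancel, List.range'_zero, List.foldl_nil]
      refine ⟨by rw [List.length_set, List.length_replicate], by rw [List.length_replicate],
        rfl, ?_, ?_⟩
      · intro m hm
        rw [bget_replicate N m hm]
        constructor
        · intro h; cases h
        · rintro ⟨h2, hc, hcr⟩
          have := cross_two_le h2 hc
          omega
      · intro m hm
        rw [lget_set]
        rw [List.length_replicate]
        by_cases hm1 : m = 1
        · subst hm1
          rw [if_pos ⟨rfl, by omega⟩, if_pos rfl]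
        · rw [if_neg (by intro h; exact hm1 h.1.symm), if_neg hm1]
          have hwr : wrA 1 m = false := by
            simp only [wrA, decide_eq_false_iff_not]
            rintro ⟨h2, h | h⟩
            · omega
            · have := cross_two_le h2 h.1
              omega
          rw [hwr, if_neg (by simp)]
          simp only [lget, List.getD_eq_getElem?_getD]
          by_cases hmN : m < N + 1
          · simp [hmN]
          · rw [List.getElem?_eq_none (by simp only [List.length_replicate]; omega)]
            rfl
    · -- inductive step: i := k + 1, 2 ≤ i ≤ N
      obtain ⟨hl1, hl2, hps, hisP, hmu⟩ := ih (by omega) (by omega)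
      set st := (List.range' 2 (k - 1)).foldl (stepA N)
        ((List.replicate (N + 1) (0 : Int)).set 1 1, List.replicate (N + 1) true,
          ([] : List Nat)) with hst
      have hrange : List.range' 2 (k + 1 - 1) = List.range' 2 (k - 1) ++ [k + 1] := by
        have h1 : k + 1 - 1 = (k - 1) + 1 := by omega
        rw [h1, List.range'_concat]
        congr 1
        · congr 1
          omega
      rw [hrange, List.foldl_append, List.foldl_cons, List.foldl_nil, ← hst]
      have hi2 : 2 ≤ k + 1 := by omega
      have hiN : k + 1 ≤ N := by omega
      -- is_prime test at i = k+1 detects primality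
      have hbp : bget st.2.1 (k + 1) = true ↔ (k + 1).minFac = k + 1 := by
        have h := hisP (k + 1) hiN
        constructor
        · intro ht
          by_contra hc
          have hcr : (k + 1) / (k + 1).minFac < k + 1 := cross_lt hi2
          have : bget st.2.1 (k + 1) = false := h.mpr ⟨hi2, hc, by omega⟩
          rw [this] at ht
          cases ht
        · intro hmf
          by_contra hc
          have hb : bget st.2.1 (k + 1) = false := by
            cases hb : bget st.2.1 (k + 1)
            · rfl
            · exact absurd hb hc
          obtain ⟨_, hne, _⟩ := h.mp hb
          exact hne hmf
      simp only [stepA]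
      have hprimes' : (if bget st.2.1 (k + 1) then st.2.2 ++ [k + 1] else st.2.2)
          = primesUpTo (k + 1) := by
        rw [primesUpTo_succ k (by omega), hps]
        by_cases hp : (k + 1).Prime
        · rw [if_pos (hbp.mpr hp.minFac_eq), if_pos hp]
        · have hm : ¬ (k + 1).minFac = k + 1 := by
            intro hmf
            exact hp ((Nat.prime_def_minFac.mpr ⟨hi2, hmf⟩))
          rw [if_neg (fun hb => hm (hbp.mp hb)), if_neg hp, List.append_nil]
      rw [hprimes']
      set mu' := (if bget st.2.1 (k + 1) then st.1.set (k + 1) (-1) else st.1) with hmu'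
      have hmu'len : mu'.length = N + 1 := by
        rw [hmu']
        by_cases hb : bget st.2.1 (k + 1) <;> simp [hb, List.length_set, hl1]
      -- value of mu' at any m ≤ N
      have hmu'val : ∀ m, m ≤ N → lget mu' m =
          if m = k + 1 ∧ (k + 1).minFac = k + 1 then -1
          else if m = 1 then 1 else if wrA k m then muRec m else 0 := by
        intro m hm
        rw [hmu']
        by_cases hb : bget st.2.1 (k + 1)
        · rw [if_pos hb, lget_set, hl1]
          by_cases hmk : m = k + 1
          · subst hmk
            rw [if_pos ⟨rfl, by omega⟩, if_pos ⟨rfl, hbp.mp hb⟩]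
          · rw [if_neg (by intro h; exact hmk h.1.symm),
              if_neg (by intro h; exact hmk h.1), hmu m hm]
        · rw [if_neg hb, hmu m hm]
          have : ¬ (m = k + 1 ∧ (k + 1).minFac = k + 1) := by
            rintro ⟨hmk, hmf⟩
            exact hb (hbp.mpr hmf)
          rw [if_neg this]
      obtain ⟨jl1, jl2, ju, jw⟩ := innerA_spec N (k + 1) hi2 (primesUpTo (k + 1)) mu' st.2.1
        (pairwise_primesUpTo (k + 1))
        (fun p hp => (mem_primesUpTo.mp hp).1.two_le) hmu'len hl2
      refine ⟨jl1, jl2, rfl, ?_, ?_⟩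
      · -- is_prime invariant at k+1
        intro m hm
        by_cases hmark : 2 ≤ m ∧ m.minFac ≠ m ∧ m / m.minFac = k + 1
        · obtain ⟨hpr, hmeq⟩ := procd_of_mark N (k + 1) m hi2 hmark.1 hm hmark.2.1 hmark.2.2
          obtain ⟨_, hw2⟩ := jw m.minFac hpr
          rw [← hmeq] at hw2
          rw [hw2]
          simp only [true_iff]
          exact ⟨hmark.1, hmark.2.1, by omega⟩
        · have hnm : ∀ p, procd N (k + 1) (primesUpTo (k + 1)) p → m ≠ (k + 1) * p := by
            intro p hp heq
            obtain ⟨hmf, hcr, h2, hN', hne⟩ := mark_of_procd N (k + 1) p m hi2 hp heq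
            exact hmark ⟨h2, hne, by rw [hmf]; exact hcr⟩
          obtain ⟨_, hu2⟩ := ju m hnm
          rw [hu2, hisP m hm]
          constructor
          · rintro ⟨h2, hc, hcr⟩
            exact ⟨h2, hc, by omega⟩
          · rintro ⟨h2, hc, hcr⟩
            refine ⟨h2, hc, ?_⟩
            rcases Nat.lt_or_ge (m / m.minFac) (k + 1) with h | h
            · omega
            · exact absurd ⟨h2, hc, by omega⟩ hmark
      · -- mu invariant at k+1
        intro m hm
        by_cases hmark : 2 ≤ m ∧ m.minFac ≠ m ∧ m / m.minFac = k + 1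
        · obtain ⟨hpr, hmeq⟩ := procd_of_mark N (k + 1) m hi2 hmark.1 hm hmark.2.1 hmark.2.2
          obtain ⟨hw1, _⟩ := jw m.minFac hpr
          rw [← hmeq] at hw1
          rw [hw1]
          -- the read of mu'[k+1] is muRec (k+1)
          have hval : lget mu' (k + 1) = muRec (k + 1) := by
            rw [hmu'val (k + 1) hiN]
            by_cases hpk : (k + 1).minFac = k + 1
            · rw [if_pos ⟨rfl, hpk⟩, muRec_two hi2, if_pos hpk]
            · have hcr : (k + 1) / (k + 1).minFac < k + 1 := cross_lt hi2
              rw [if_neg (by rintro ⟨_, h⟩; exact hpk h), if_neg (by omega),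
                if_pos (by simp only [wrA, decide_eq_true_eq]; exact ⟨hi2, Or.inr ⟨hpk, by omega⟩⟩)]
          rw [hval]
          have hm1 : m ≠ 1 := by omega
          have hwr : wrA (k + 1) m = true := by
            simp only [wrA, decide_eq_true_eq]
            exact ⟨hmark.1, Or.inr ⟨hmark.2.1, by omega⟩⟩
          rw [if_neg hm1, if_pos hwr, muRec_two hmark.1]
          rw [if_neg hmark.2.1, hmark.2.2]
        · have hnm : ∀ p, procd N (k + 1) (primesUpTo (k + 1)) p → m ≠ (k + 1) * p := by
            intro p hp heq
            obtain ⟨hmf, hcr, h2, hN', hne⟩ := mark_of_procd N (k + 1) p m hi2 hp heq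
            exact hmark ⟨h2, hne, by rw [hmf]; exact hcr⟩
          obtain ⟨hu1, _⟩ := ju m hnm
          rw [hu1, hmu'val m hm]
          by_cases hmk : m = k + 1 ∧ (k + 1).minFac = k + 1
          · obtain ⟨hmk1, hmk2⟩ := hmk
            subst hmk1
            rw [if_pos ⟨rfl, hmk2⟩, if_neg (by omega),
              if_pos (by simp only [wrA, decide_eq_true_eq]; exact ⟨hi2, Or.inl ⟨hmk2, by omega⟩⟩),
              muRec_two hi2, if_pos hmk2]
          · rw [if_neg hmk]
            by_cases hm1 : m = 1
            · rw [if_pos hm1, if_pos hm1]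
            · rw [if_neg hm1, if_neg hm1]
              have hwreq : wrA k m = wrA (k + 1) m := by
                simp only [wrA]
                congr 1
                apply propext
                constructor
                · rintro ⟨h2, h | h⟩
                  · exact ⟨h2, Or.inl ⟨h.1, by omega⟩⟩
                  · exact ⟨h2, Or.inr ⟨h.1, by omega⟩⟩
                · rintro ⟨h2, h | h⟩
                  · refine ⟨h2, Or.inl ⟨h.1, ?_⟩⟩
                    rcases Nat.lt_or_ge m (k + 1) with hlt | hge
                    · omega
                    · -- m = k+1 prime would contradict hmk
                      have : m = k + 1 := by omega
                      subst this
                      exact absurd ⟨rfl, h.1⟩ hmk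
                  · refine ⟨h2, Or.inr ⟨h.1, ?_⟩⟩
                    rcases Nat.lt_or_ge (m / m.minFac) (k + 1) with hlt | hge
                    · omega
                    · exact absurd ⟨h2, h.1, by omega⟩ hmark
              rw [hwreq]

lemma mu_lists_eq (N : Nat) (hN : 1 ≤ N) :
    ((List.range' 2 (N - 1)).foldl (stepA N)
      ((List.replicate (N + 1) (0 : Int)).set 1 1, List.replicate (N + 1) true, ([] : List Nat))).1
    = (List.range' 2 (N - 1)).foldl stepB ((List.replicate (N + 1) (0 : Int)).set 1 1) := by
  obtain ⟨al1, _, _, _, amu⟩ := A_inv N hN N hN le_rfl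
  obtain ⟨bl, bmu⟩ := B_inv N hN N hN le_rfl
  have conv1 : ∀ (l : List Int) (n : Nat) (h : n < l.length), lget l n = l[n]'h := by
    intro l n h
    simp [lget, List.getD_eq_getElem?_getD, List.getElem?_eq_getElem h]
  apply List.ext_getElem (by rw [al1, bl])
  intro n h1 h2
  have hn : n ≤ N := by rw [al1] at h1; omega
  have ha := amu n hn
  have hb := bmu n hn
  rw [if_pos hn] at hb
  rw [← conv1 _ n h1, ← conv1 _ n h2, ha, hb]
  by_cases hn1 : n = 1
  · subst hn1
    rw [if_pos rfl, muRec]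
  · rw [if_neg hn1]
    rcases Nat.lt_or_ge n 2 with hlt | hge
    · have hn0 : n = 0 := by omega
      subst hn0
      rw [if_neg (by simp [wrA]), muRec]
    · have hwr : wrA N n = true := by
        simp only [wrA, decide_eq_true_eq]
        refine ⟨hge, ?_⟩
        by_cases hp : n.minFac = n
        · exact Or.inl ⟨hp, hn⟩
        · have := cross_lt hge
          exact Or.inr ⟨hp, by omega⟩
      rw [if_pos hwr]

-- ===== VERDICT (by name: the statement is the Claim_ definition above) =====
theorem mertens_spec : Claim_equal_mertens := by
  intro limit _ hpre
  unfold Spec_mertens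
  have hN : 1 ≤ limit.toNat := by unfold Pre_mertens at hpre; omega
  simp only [mertens, mertens_alt]
  rw [mu_lists_eq limit.toNat hN]
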